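-- pv_equiv track=rewrite | github.com/JoshNewham1/Python | AdventOfCode2018/Day08/Day8Part2.py | parse
-- ===== SOURCE A (Python) =====
-- def parse(data):
--     # Get the header information which is the number of child nodes and number of metadata entries
--     children, metadataEntries = data[:2]
--     # Get the rest of the input (the children)
--     data = data[2:]
--     scores = []  # The 'score' is total of the metadata of each child (including to the root node)
--     totals = 0
--
--     for i in range(children):
--         total, score, data = parse(data)  # Recursively call parse method for each child node
--         totals += total  # Increment the grand total with the total of each child node's data
--         scores.append(score)
--
--     totals += sum(data[:metadataEntries])
--
--     if children == 0:  # If the node has no children, don't attempt to find the value of the root node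
--         return totals, sum(data[:metadataEntries]), data[metadataEntries:]
--     else:  # If the node has children, find value to root node
--         metadataSum = 0
--         for value in data[:metadataEntries]:
--             if value > 0 and value <= len(scores):  # Whilst the node has children
--                 metadataSum += scores[value - 1]
--
--         return totals, metadataSum, data[metadataEntries:]
-- ===== SOURCE B (Python) =====
-- # Two-phase re-implementation: parse the flat list into an explicit tree with an
-- # index cursor, then compute the metadata total and the part-2 value by two small
-- # recursions over the built tree.
-- def parse(data):
--     def build(i):
--         c, m = data[i], data[i + 1]
--         i += 2
--         kids = []
--         for _ in range(c):
--             node, i = build(i)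
--             kids.append(node)
--         return (c, kids, data[i:i + m]), i + m
--
--     def total(node):
--         _c, kids, meta = node
--         return sum(meta) + sum(total(k) for k in kids)
--
--     def value(node):
--         c, kids, meta = node
--         if c == 0:                       # a node with no declared children
--             return sum(meta)
--         vals = [value(k) for k in kids]
--         return sum(vals[v - 1] for v in meta if 0 < v <= len(vals))
--
--     root, end = build(0)
--     return total(root), value(root), data[end:]
-- ===== Notes on version B (the rewrite author's own statement) =====
-- stated objective: alternative
-- what changed: A computes everything in one recursive pass that threads the shrinking list through its child loop; B first parses the flat list into an explicit tree with an index cursor and then computes the metadata total and the part-2 value by two separate recursions over the built tree.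
-- outside the precondition, e.g. on parse([0, -1, 5]): A returns (0, 0, [5]), B returns (0, 0, [-1, 5]); on parse([0, -2, 5, 6, 7]): A returns (5, 5, [6, 7]), B returns (0, 0, [0, -2, 5, 6, 7])
import Mathlib
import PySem

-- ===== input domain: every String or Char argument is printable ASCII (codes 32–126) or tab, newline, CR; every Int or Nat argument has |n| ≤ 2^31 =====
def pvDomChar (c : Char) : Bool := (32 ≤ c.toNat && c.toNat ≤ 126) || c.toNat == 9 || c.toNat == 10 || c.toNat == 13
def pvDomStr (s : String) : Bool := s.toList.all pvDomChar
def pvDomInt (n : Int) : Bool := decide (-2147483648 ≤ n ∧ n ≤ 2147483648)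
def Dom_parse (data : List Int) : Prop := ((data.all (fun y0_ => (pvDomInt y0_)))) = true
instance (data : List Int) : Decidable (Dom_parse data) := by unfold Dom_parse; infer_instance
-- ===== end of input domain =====

-- B re-implements A in two phases (build an explicit tree with an index cursor, then two
-- small recursions over the tree); objective: alternative decomposition, same asymptotic cost.

-- ===== PORT A =====
-- Python A is one directly recursive function; the recursion depth is bounded by the list
-- length (each nested call sees a list at least 2 shorter), so fuel := data.length is a
-- totality guard only.  Where Python raises ValueError ('children, metadataEntries = data[:2]'
-- with fewer than 2 elements, excluded by Pre_) the port returns (0, 0, []).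
mutual
def parseF : Nat → List Int → Int × Int × List Int
  | 0, _ => (0, 0, [])
  | fuel+1, c :: m :: rest =>
      -- for i in range(children): total, score, data = parse(data); totals += total; scores.append(score)
      let st := parseLoop fuel c.toNat (0, [], rest)
      let md := PySem.List.slice st.2.2 none (some m)        -- data[:metadataEntries]
      let totals := st.1 + md.sum
      if c == 0 then
        (totals, (PySem.List.slice st.2.2 none (some m)).sum, PySem.List.slice st.2.2 (some m) none)
      else
        let metadataSum := md.foldl
          (fun s v => if v > 0 ∧ v ≤ (st.2.1.length : Int)
                      then s + ((PySem.List.pyGet? st.2.1 (v - 1)).getD 0)   -- scores[value-1]; guard keeps it in range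
                      else s) 0
        (totals, metadataSum, PySem.List.slice st.2.2 (some m) none)
  | _+1, _ => (0, 0, [])                                        -- ValueError: unpacking data[:2]
def parseLoop : Nat → Nat → Int × List Int × List Int → Int × List Int × List Int
  | _, 0, acc => acc
  | fuel, k+1, acc =>
      let p := parseF fuel acc.2.2
      parseLoop fuel k (acc.1 + p.1, acc.2.1 ++ [p.2.1], p.2.2)
end

def parse (data : List Int) : Int × Int × List Int := parseF data.length data

-- ===== PORT B =====
-- explicit tree (mutual pair instead of a nested inductive: children list = PForest)
mutual
inductive PNode : Type where
  | mk : Int → PForest → List Int → PNode            -- declared children count, children, metadata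
inductive PForest : Type where
  | nil : PForest
  | cons : PNode → PForest → PForest
end

def PForest.ofList : List PNode → PForest
  | [] => .nil
  | n :: t => .cons n (PForest.ofList t)

-- build(i): read header at the cursor, recurse for the children, slice out the metadata.
-- Same fuel guard as above; data[i]/data[i+1] raise IndexError outside Pre_ (getD 0 unreachable).
mutual
def buildF : Nat → List Int → Int → PNode × Int
  | 0, _, i => (.mk 0 .nil [], i)
  | fuel+1, data, i =>
      let c := (PySem.List.pyGet? data i).getD 0               -- c, m = data[i], data[i+1]
      let m := (PySem.List.pyGet? data (i + 1)).getD 0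
      let st := buildLoop fuel data c.toNat ([], i + 2)        -- for _ in range(c)
      (.mk c (PForest.ofList st.1) (PySem.List.slice data (some st.2) (some (st.2 + m))), st.2 + m)
def buildLoop : Nat → List Int → Nat → List PNode × Int → List PNode × Int
  | _, _, 0, acc => acc
  | fuel, data, k+1, acc =>
      let p := buildF fuel data acc.2
      buildLoop fuel data k (acc.1 ++ [p.1], p.2)
end

mutual
def totalN : PNode → Int                                        -- sum(md) + sum(total(k) for k in kids)
  | .mk _ kids md => md.sum + totalF kids
def totalF : PForest → Int
  | .nil => 0
  | .cons n t => totalN n + totalF t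
end

mutual
def valueN : PNode → Int
  | .mk c kids md =>
      if c == 0 then md.sum                                 -- a node with no declared children
      else
        let vals := valuesF kids                            -- vals = [value(k) for k in kids]
        md.foldl
          (fun s v => if v > 0 ∧ v ≤ (vals.length : Int)
                      then s + ((PySem.List.pyGet? vals (v - 1)).getD 0)
                      else s) 0
def valuesF : PForest → List Int
  | .nil => []
  | .cons n t => valueN n :: valuesF t
end

def parse_alt (data : List Int) : Int × Int × List Int :=
  let p := buildF data.length data 0
  (totalN p.1, valueN p.1, PySem.List.slice data (some p.2) none)

-- ===== PRECONDITION & SPEC =====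
-- One-pass state-machine acceptor for the node grammar: a node is a 2-element header
-- (children count c, NONNEGATIVE metadata count m), then max(c,0) well-formed children,
-- then its metadata (metadata cut off by the end of the list is truncated by Python
-- slicing, exactly as both programs do; elements after the root node are ignored, as
-- both programs ignore them).
inductive ScanSt : Type where
  | done : ScanSt                                   -- root node complete (rest ignored)
  | needC : List (Nat × Nat) → ScanSt               -- next element is a child's children-count
  | needM : Nat → List (Nat × Nat) → ScanSt         -- next element is that child's metadata-count
  | mdRun : List (Nat × Nat) → ScanSt               -- consuming metadata of the top frame

-- stack frames (children not yet started, metadata count); pop finished frames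
def scanNorm : List (Nat × Nat) → ScanSt
  | [] => .done
  | (0, 0) :: r => scanNorm r
  | (0, m+1) :: r => .mdRun ((0, m+1) :: r)
  | (k+1, m) :: r => .needC ((k+1, m) :: r)

def scan : List Int → ScanSt → Bool
  | _, .done => true
  | [], .needC _ => false                           -- a header is missing: the parse raises
  | [], .needM _ _ => false
  | [], .mdRun st => st.all (fun f => f.1 == 0)     -- list ended inside metadata: ok iff no
                                                    -- frame still expects a child header
  | x :: l, .needC ((k, M) :: r) => scan l (.needM x.toNat ((k - 1, M) :: r))
  | _ :: _, .needC [] => false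
  | x :: l, .needM c st => if x < 0 then false else scan l (scanNorm ((c, x.toNat) :: st))
  | _ :: l, .mdRun st =>
      match st with
      | (0, m+1) :: r => scan l (scanNorm ((0, m) :: r))
      | _ => false

-- Pre_ excludes records with a NEGATIVE metadata count, on which A still returns a value
-- by accident of Python's negative-slice semantics (data[:m]/data[m:] index from the end)
-- that B's cursor arithmetic does not reproduce.
def Pre_parse (data : List Int) : Prop := scan data (ScanSt.needC [(1, 0)]) = true
instance (data : List Int) : Decidable (Pre_parse data) := by unfold Pre_parse; infer_instance

def pvWitness_parse : List Int := [2, 3, 0, 3, 10, 11, 12, 1, 1, 0, 1, 99, 2, 1, 1, 2]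

def Spec_parse (data : List Int) (out : Int × Int × List Int) : Prop := out = parse_alt data
instance (data : List Int) (out : Int × Int × List Int) : Decidable (Spec_parse data out) := by unfold Spec_parse; infer_instance

-- ===== CLAIM (what is proved, stated in full; the proofs are below) =====
def Claim_equal_parse : Prop := ∀ (data : List Int), Dom_parse data → Pre_parse data → Spec_parse data (parse data)

-- ===== LEMMAS AND PROOFS =====

theorem totalF_ofList (ts : List PNode) : totalF (PForest.ofList ts) = (ts.map totalN).sum := by
  induction ts with
  | nil => simp [PForest.ofList, totalF]
  | cons n t ih => simp [PForest.ofList, totalF, ih]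

theorem valuesF_ofList (ts : List PNode) : valuesF (PForest.ofList ts) = ts.map valueN := by
  induction ts with
  | nil => simp [PForest.ofList, valuesF]
  | cons n t ih => simp [PForest.ofList, valuesF, ih]

theorem scan_nil_norm (st : List (Nat × Nat)) (h : st.all (fun f => f.1 == 0) = true) :
    scan [] (scanNorm st) = true := by
  induction st with
  | nil => rfl
  | cons a r ih =>
    obtain ⟨k, m⟩ := a
    simp only [List.all_cons, Bool.and_eq_true, beq_iff_eq] at h
    obtain ⟨hk, hr⟩ := h
    subst hk
    cases m with
    | zero => rw [scanNorm]; exact ih hr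
    | succ m =>
      rw [scanNorm]
      simp [scan, List.all_cons, hr]

theorem scan_meta (mm : Nat) : ∀ (l : List Int) (st : List (Nat × Nat)),
    scan l (scanNorm ((0, mm) :: st)) = true → scan (l.drop mm) (scanNorm st) = true := by
  induction mm with
  | zero => intro l st h; rw [scanNorm] at h; simpa using h
  | succ mm ih =>
    intro l st h
    rw [scanNorm] at h
    cases l with
    | nil =>
      simp only [scan, List.all_cons, Bool.and_eq_true, beq_iff_eq] at h
      exact scan_nil_norm st h.2
    | cons x l' =>
      rw [scan] at h
      simpa [List.drop_succ_cons] using ih l' st h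

def NodeStmt (fuel : Nat) : Prop :=
  ∀ (data : List Int) (i : Nat) (k M : Nat) (rst : List (Nat × Nat)),
    scan (data.drop i) (ScanSt.needC ((k + 1, M) :: rst)) = true → data.length - i ≤ fuel →
    ∃ (t : PNode) (j : Nat), i + 2 ≤ j ∧
      scan (data.drop j) (scanNorm ((k, M) :: rst)) = true ∧
      buildF fuel data (i : Int) = (t, (j : Int)) ∧
      parseF fuel (data.drop i) = (totalN t, valueN t, data.drop j)

def KidsStmt (fuel : Nat) : Prop :=
  ∀ (c : Nat) (data : List Int) (i : Nat) (M : Nat) (rst : List (Nat × Nat)),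
    scan (data.drop i) (scanNorm ((c, M) :: rst)) = true → data.length - i ≤ fuel →
    ∃ (ts : List PNode) (j : Nat), i ≤ j ∧ ts.length = c ∧
      scan (data.drop j) (scanNorm ((0, M) :: rst)) = true ∧
      (∀ acc : List PNode, buildLoop fuel data c (acc, (i : Int)) = (acc ++ ts, (j : Int))) ∧
      (∀ (T : Int) (S : List Int),
        parseLoop fuel c (T, S, data.drop i) = (T + (ts.map totalN).sum, S ++ ts.map valueN, data.drop j))

theorem node_zero : NodeStmt 0 := by
  intro data i k M rst hs hf
  have hd : data.drop i = [] := by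
    apply List.eq_nil_of_length_eq_zero
    rw [List.length_drop]; omega
  rw [hd] at hs
  simp [scan] at hs

theorem kids_of_node (fuel : Nat) (hn : NodeStmt fuel) : KidsStmt fuel := by
  intro c
  induction c with
  | zero =>
    intro data i M rst hs hf
    exact ⟨[], i, Nat.le_refl _, rfl, hs,
      fun acc => by simp [buildLoop], fun T S => by simp [parseLoop]⟩
  | succ c ih =>
    intro data i M rst hs hf
    rw [scanNorm] at hs
    obtain ⟨t, j, hij, hs', hbuild, hparse⟩ := hn data i c M rst hs hf
    obtain ⟨ts, j2, hjj2, hlen, hs'', hB, hA⟩ := ih data j M rst hs' (by omega)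
    refine ⟨t :: ts, j2, by omega, by simp [hlen], hs'', ?_, ?_⟩
    · intro acc
      rw [buildLoop]
      simp only [hbuild]
      rw [hB (acc ++ [t])]
      simp
    · intro T S
      rw [parseLoop]
      simp only [hparse]
      rw [hA (T + totalN t) (S ++ [valueN t])]
      simp [add_assoc]

theorem node_of_kids (fuel : Nat) (hk : KidsStmt fuel) : NodeStmt (fuel + 1) := by
  intro data i k M rst hs hf
  cases hdd : data.drop i with
  | nil => rw [hdd] at hs; simp [scan] at hs
  | cons c t0 =>
    cases hdt : t0 with
    | nil =>
      rw [hdd, hdt] at hs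
      rw [scan] at hs
      simp [scan] at hs
    | cons m rest =>
      rw [hdt] at hdd
      rw [hdd] at hs
      rw [scan] at hs
      rw [scan] at hs
      split_ifs at hs with hmneg
      have hm : 0 ≤ m := by omega
      have hrest : data.drop (i + 2) = rest := by
        have := congrArg (List.drop 2) hdd
        simpa [List.drop_drop, Nat.add_comm] using this
      have hlen2 : 2 + rest.length = data.length - i := by
        have := congrArg List.length hdd
        simp [List.length_drop] at this
        omega
      have hs1 : scan (data.drop (i + 2)) (scanNorm ((c.toNat, m.toNat) :: (k + 1 - 1, M) :: rst)) = true := by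
        rw [hrest]; exact hs
      simp only [Nat.add_sub_cancel] at hs1
      obtain ⟨ts, j1, hij1, htslen, hs2, hB, hA⟩ :=
        hk c.toNat data (i + 2) m.toNat ((k, M) :: rst) hs1 (by omega)
      have hs3 := scan_meta m.toNat (data.drop j1) ((k, M) :: rst) hs2
      rw [List.drop_drop] at hs3
      refine ⟨PNode.mk c (PForest.ofList ts) ((data.drop j1).take m.toNat), j1 + m.toNat,
        by omega, hs3, ?_, ?_⟩
      · -- B side
        rw [buildF]
        have hgc : PySem.List.pyGet? data (i : Int) = some c := by
          rw [PySem.List.pyGet?_natCast]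
          have h0 : (data.drop i)[0]? = some c := by rw [hdd]; rfl
          rwa [List.getElem?_drop, Nat.add_zero] at h0
        have hgm : PySem.List.pyGet? data ((i : Int) + 1) = some m := by
          rw [show ((i : Int) + 1) = ((i + 1 : Nat) : Int) by push_cast; ring,
            PySem.List.pyGet?_natCast]
          have h1' : (data.drop i)[1]? = some m := by rw [hdd]; rfl
          rwa [List.getElem?_drop] at h1'
        simp only [hgc, hgm, Option.getD_some]
        rw [show ((i : Int) + 2) = ((i + 2 : Nat) : Int) by push_cast; ring]
        rw [hB []]
        simp only [List.nil_append]
        have hm' : ((j1 : Int) + m) = ((j1 + m.toNat : Nat) : Int) := by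
          push_cast [Int.toNat_of_nonneg hm]; ring
        rw [hm', PySem.List.slice_natCast]
        simp
      · -- A side
        rw [parseF]
        rw [show rest = data.drop (i + 2) from hrest.symm, hA 0 []]
        simp only [zero_add, List.nil_append]
        rw [PySem.List.slice_to _ hm, PySem.List.slice_from _ hm, List.drop_drop]
        by_cases hc0 : c = 0
        · subst hc0
          have hts : ts = [] := List.length_eq_zero_iff.mp (by simpa using htslen)
          subst hts
          simp [PForest.ofList, totalN, valueN, totalF]
        · have hcb : (c == 0) = false := by simpa using hc0
          rw [if_neg (by simp [hcb])]
          simp [totalN, valueN, hcb, totalF_ofList, valuesF_ofList, htslen, add_comm]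

theorem node_all (fuel : Nat) : NodeStmt fuel := by
  induction fuel with
  | zero => exact node_zero
  | succ f ih => exact node_of_kids f (kids_of_node f ih)

-- ===== VERDICT (by name: the statement is the Claim_ definition above) =====
theorem parse_spec : Claim_equal_parse := by
  intro data _hd hpre
  unfold Pre_parse at hpre
  have hpre' : scan (data.drop 0) (ScanSt.needC ((0 + 1, 0) :: [])) = true := by
    rw [List.drop_zero]; exact hpre
  obtain ⟨t, j, hij, _hcont, hbuild, hparse⟩ :=
    node_all data.length data 0 0 0 [] hpre' (by omega)
  unfold Spec_parse parse parse_alt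
  rw [List.drop_zero] at hparse
  rw [show ((0 : Int)) = ((0 : Nat) : Int) by norm_num, hbuild, hparse]
  simp [PySem.List.slice_from_natCast]
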